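-- pv_equiv track=rewrite | github.com/pratikshabhadani/Private-key-public-key | pub_pvt_key.py | pubkey_verify
-- ===== SOURCE A (Python) =====
-- def pubkey_verify(key1, key2):
--     for i in range(0, 27):
--         temp_key=""
--         for char in key1:
--             x= ord(char)+i
--             if(x>ord("z")): x= x-26
--             temp_key+=chr(x)
--         if(temp_key==key2): return True
--     return False
-- ===== SOURCE B (Python) =====
-- def pubkey_verify(key1, key2):
--     # Derive the (at most two) candidate shifts from the first character pair,
--     # then verify each once -- instead of trying all 27 shifts.
--     if len(key1) != len(key2):
--         return False
--     if not key1: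
--         return True
--     def shift(c, i):
--         x = ord(c) + i
--         return x - 26 if x > ord("z") else x
--     diff = ord(key2[0]) - ord(key1[0])
--     candidates = [i for i in (diff, diff + 26) if 0 <= i <= 26]
--     return any(all(shift(c, i) == ord(d) for c, d in zip(key1, key2))
--                for i in candidates)
-- ===== Notes on version B (the rewrite author's own statement) =====
-- stated objective: faster
-- what changed: Instead of trying all 27 shifts and rebuilding the shifted string each time, B checks the lengths, derives the at most two candidate shifts from the first character pair, and verifies each candidate in one zip pass.
import Mathlib
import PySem

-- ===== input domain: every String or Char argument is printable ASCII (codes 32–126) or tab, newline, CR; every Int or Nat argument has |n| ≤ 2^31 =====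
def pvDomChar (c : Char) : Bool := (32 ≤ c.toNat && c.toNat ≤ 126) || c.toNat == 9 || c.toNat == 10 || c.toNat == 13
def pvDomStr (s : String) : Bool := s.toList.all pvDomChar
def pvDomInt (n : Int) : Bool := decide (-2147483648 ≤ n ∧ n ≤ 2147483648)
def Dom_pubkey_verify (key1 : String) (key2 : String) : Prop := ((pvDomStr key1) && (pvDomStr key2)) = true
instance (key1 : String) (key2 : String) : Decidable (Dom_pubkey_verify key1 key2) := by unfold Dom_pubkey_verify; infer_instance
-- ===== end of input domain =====

-- B replaces A's 27 shift-and-rebuild passes by one length check, at most two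
-- candidate shifts derived from the first characters, and a single zip pass each.

-- ===== PORT A =====
-- inner loop of A: temp_key built by successive += chr(x)
def pvA_temp (key1 : List Char) (i : Nat) : List Char :=
  key1.foldl (fun acc c =>
    let x := c.toNat + i
    let x' := if x > 122 then x - 26 else x
    acc ++ [Char.ofNat x']) []

-- outer loop of A with its early return
def pvA_loop (key1 key2 : List Char) : List Nat → Bool
  | [] => false
  | i :: rest => if pvA_temp key1 i = key2 then true else pvA_loop key1 key2 rest

def pubkey_verify (key1 : String) (key2 : String) : Bool :=
  pvA_loop key1.toList key2.toList (List.range 27)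

-- ===== PORT B =====
def pvB_shift (i : Nat) (c : Char) : Nat :=
  let x := c.toNat + i
  if x > 122 then x - 26 else x

def pubkey_verify_alt (key1 : String) (key2 : String) : Bool :=
  let l1 := key1.toList
  let l2 := key2.toList
  if l1.length ≠ l2.length then false
  else
    match l1, l2 with
    | [], _ => true
    | _ :: _, [] => false
    | c :: _, d :: _ =>
      let diff : Int := (d.toNat : Int) - (c.toNat : Int)
      let cands := [diff, diff + 26].filter (fun i => decide (0 ≤ i ∧ i ≤ 26))
      cands.any (fun i =>
        (l1.zip l2).all (fun p => pvB_shift i.toNat p.1 == p.2.toNat))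

-- ===== PRECONDITION & SPEC =====
def Spec_pubkey_verify (key1 : String) (key2 : String) (out : Bool) : Prop := out = pubkey_verify_alt key1 key2
instance (key1 : String) (key2 : String) (out : Bool) : Decidable (Spec_pubkey_verify key1 key2 out) := by unfold Spec_pubkey_verify; infer_instance

-- ===== CLAIM (what is proved, stated in full; the proofs are below) =====
def Claim_equal_pubkey_verify : Prop := ∀ (key1 : String) (key2 : String), Dom_pubkey_verify key1 key2 → Spec_pubkey_verify key1 key2 (pubkey_verify key1 key2)

-- ===== LEMMAS AND PROOFS =====

theorem pv_toNat_ofNat (n : Nat) (h : n ≤ 152) : (Char.ofNat n).toNat = n := by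
  have hv : n.isValidChar := Or.inl (by omega)
  simp [Char.ofNat, hv, Char.ofNatAux, Char.toNat]

theorem pv_ofNat_eq_iff (n : Nat) (h : n ≤ 152) (d : Char) :
    Char.ofNat n = d ↔ n = d.toNat := by
  constructor
  · intro he; rw [← he, pv_toNat_ofNat n h]
  · intro he; rw [he, Char.ofNat_toNat]

theorem pvB_shift_le (i : Nat) (c : Char) (hc : c.toNat ≤ 126) (hi : i ≤ 26) :
    pvB_shift i c ≤ 152 := by
  simp only [pvB_shift]; split <;> omega

theorem pvA_temp_foldl (l : List Char) (i : Nat) (acc : List Char) :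
    l.foldl (fun acc c =>
      let x := c.toNat + i
      let x' := if x > 122 then x - 26 else x
      acc ++ [Char.ofNat x']) acc = acc ++ l.map (fun c => Char.ofNat (pvB_shift i c)) := by
  induction l generalizing acc with
  | nil => simp
  | cons c t ih => simp [List.foldl_cons, ih, pvB_shift]

theorem pvA_temp_eq_map (l : List Char) (i : Nat) :
    pvA_temp l i = l.map (fun c => Char.ofNat (pvB_shift i c)) := by
  simp only [pvA_temp, pvA_temp_foldl, List.nil_append]

theorem pvA_loop_iff (l1 l2 : List Char) (L : List Nat) :
    pvA_loop l1 l2 L = true ↔ ∃ i ∈ L, pvA_temp l1 i = l2 := by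
  induction L with
  | nil => simp [pvA_loop]
  | cons j t ih =>
    simp only [pvA_loop]
    split
    · simp_all
    · rw [ih]; simp_all

-- the A-side map equality, phrased as B's length check plus zip pass
theorem pv_map_iff_zip (i : Nat) (hi : i ≤ 26) :
    ∀ (l1 l2 : List Char), (∀ c ∈ l1, c.toNat ≤ 126) →
    (l1.map (fun c => Char.ofNat (pvB_shift i c)) = l2 ↔
      l1.length = l2.length ∧
      ((l1.zip l2).all (fun p => pvB_shift i p.1 == p.2.toNat)) = true) := by
  intro l1
  induction l1 with
  | nil => intro l2 _; cases l2 <;> simp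
  | cons c t ih =>
    intro l2 hc
    cases l2 with
    | nil => simp
    | cons d t2 =>
      have hhd : Char.ofNat (pvB_shift i c) = d ↔ pvB_shift i c = d.toNat :=
        pv_ofNat_eq_iff _ (pvB_shift_le i c (hc c (by simp)) hi) d
      have iht := ih t2 (fun x hx => hc x (List.mem_cons_of_mem _ hx))
      simp only [List.map_cons, List.cons.injEq, List.length_cons, List.zip_cons_cons,
        List.all_cons, Bool.and_eq_true, beq_iff_eq, hhd, iht]
      constructor
      · rintro ⟨h1, h2, h3⟩; exact ⟨by omega, h1, h3⟩
      · rintro ⟨h1, h2, h3⟩; exact ⟨h2, by omega, h3⟩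

-- candidate completeness: any successful shift is diff or diff + 26
theorem pv_shift_cases (i : Nat) (c d : Char) (h : pvB_shift i c = d.toNat) :
    (i : Int) = (d.toNat : Int) - (c.toNat : Int) ∨
    (i : Int) = (d.toNat : Int) - (c.toNat : Int) + 26 := by
  simp only [pvB_shift] at h
  split at h <;> omega

-- proof-only restatement of B's body on plain lists (pubkey_verify_alt unfolds to it)
def pvB_core (l1 l2 : List Char) : Bool :=
  if l1.length ≠ l2.length then false
  else
    match l1, l2 with
    | [], _ => true
    | _ :: _, [] => false
    | c :: _, d :: _ =>
      let diff : Int := (d.toNat : Int) - (c.toNat : Int)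
      let cands := [diff, diff + 26].filter (fun i => decide (0 ≤ i ∧ i ≤ 26))
      cands.any (fun i =>
        (l1.zip l2).all (fun p => pvB_shift i.toNat p.1 == p.2.toNat))

theorem pv_main (l1 l2 : List Char) (h1 : ∀ c ∈ l1, c.toNat ≤ 126) :
    pvA_loop l1 l2 (List.range 27) = pvB_core l1 l2 := by
  unfold pvB_core
  by_cases hlen : l1.length = l2.length
  · rw [if_neg (by omega)]
    cases l1 with
    | nil =>
      cases l2 with
      | nil =>
        have : pvA_temp [] 0 = ([] : List Char) := by simp [pvA_temp]
        rw [(pvA_loop_iff [] [] _).mpr ⟨0, by simp, this⟩]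
      | cons d t2 => simp at hlen
    | cons c t =>
      cases l2 with
      | nil => simp at hlen
      | cons d t2 =>
        simp only []
        by_cases hA : pvA_loop (c :: t) (d :: t2) (List.range 27) = true
        · rw [hA]
          obtain ⟨i, hiL, htemp⟩ := (pvA_loop_iff _ _ _).mp hA
          have hi : i ≤ 26 := by simpa using Nat.lt_succ_iff.mp (List.mem_range.mp hiL)
          rw [pvA_temp_eq_map] at htemp
          have hz := (pv_map_iff_zip i hi (c :: t) (d :: t2) h1).mp htemp
          have hhd : pvB_shift i c = d.toNat := by
            have := congrArg (fun l => l.headI) htemp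
            simp at this
            rw [pv_ofNat_eq_iff _ (pvB_shift_le i c (h1 c (by simp)) hi) d] at this
            exact this
          symm
          rw [List.any_eq_true]
          refine ⟨(i : Int), ?_, ?_⟩
          · rw [List.mem_filter]
            rcases pv_shift_cases i c d hhd with hcase | hcase
            · exact ⟨by simp [← hcase], by simp; omega⟩
            · refine ⟨?_, by simp; omega⟩
              simp only [List.mem_cons]
              right; omega
          · simpa using hz.2
        · rw [Bool.not_eq_true] at hA
          rw [hA]; symm
          rw [Bool.eq_false_iff]
          intro hany
          obtain ⟨iZ, hmem, hall⟩ := List.any_eq_true.mp hany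
          rw [List.mem_filter] at hmem
          have hbound : 0 ≤ iZ ∧ iZ ≤ 26 := by simpa using hmem.2
          set i : Nat := iZ.toNat with hidef
          have hi : i ≤ 26 := by omega
          have hmap : (c :: t).map (fun c => Char.ofNat (pvB_shift i c)) = d :: t2 :=
            (pv_map_iff_zip i hi (c :: t) (d :: t2) h1).mpr ⟨hlen, by simpa using hall⟩
          have : pvA_loop (c :: t) (d :: t2) (List.range 27) = true := by
            rw [pvA_loop_iff]
            exact ⟨i, List.mem_range.mpr (by omega), by rw [pvA_temp_eq_map]; exact hmap⟩
          rw [hA] at this; exact absurd this (by simp)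
  · rw [if_pos (by omega)]
    rw [Bool.eq_false_iff]
    intro hA
    obtain ⟨i, hiL, htemp⟩ := (pvA_loop_iff _ _ _).mp hA
    have := congrArg List.length htemp
    rw [pvA_temp_eq_map] at htemp
    have := congrArg List.length htemp
    simp at this
    omega

-- ===== VERDICT (by name: the statement is the Claim_ definition above) =====
theorem pubkey_verify_spec : Claim_equal_pubkey_verify := by
  intro key1 key2 hdom
  unfold Spec_pubkey_verify pubkey_verify
  rw [show pubkey_verify_alt key1 key2 = pvB_core key1.toList key2.toList from rfl]
  have h1 : ∀ c ∈ key1.toList, c.toNat ≤ 126 := by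
    unfold Dom_pubkey_verify pvDomStr pvDomChar at hdom
    simp only [Bool.and_eq_true, List.all_eq_true] at hdom
    intro c hc
    have := hdom.1 c hc
    simp at this
    omega
  exact pv_main key1.toList key2.toList h1
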